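-- pv_equiv track=rewrite | github.com/vinchinzu/euler | python/983.py | _quick_harmony_count_equals_n
-- ===== SOURCE A (Python) =====
-- from typing import Dict, List, Sequence, Tuple
--
-- Point = Tuple[int, int]
--
-- _OFF = 1 << 15
--
-- _SHIFT = 17
--
-- def _encode(x: int, y: int) -> int:
--     return ((x + _OFF) << _SHIFT) | (y + _OFF)
--
-- def _quick_harmony_count_equals_n(
--     centers: Sequence[Point], circle_points: Sequence[Point], n: int
-- ) -> bool:
--     # Count only points touched by at least two circles; stop early if too many.
--     counts: Dict[int, int] = {}
--     harmony_count = 0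
--     for cx, cy in centers:
--         for vx, vy in circle_points:
--             key = _encode(cx + vx, cy + vy)
--             cur = counts.get(key)
--             if cur is None:
--                 counts[key] = 1
--             elif cur == 1:
--                 counts[key] = 2
--                 harmony_count += 1
--                 if harmony_count > n:
--                     return False
--             else:
--                 counts[key] = cur + 1
--     return harmony_count == n
-- ===== SOURCE B (Python) =====
-- _OFF = 1 << 15
-- _SHIFT = 17
--
--
-- def _encode(x: int, y: int) -> int:
--     return ((x + _OFF) << _SHIFT) | (y + _OFF)
--
--
-- def _quick_harmony_count_equals_n(centers, circle_points, n):
--     # Sort-then-scan: flatten all sums into one sorted list of encoded keys,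
--     # then count runs of length >= 2 in a single linear scan (no dict at all).
--     pts = sorted(_encode(cx + vx, cy + vy)
--                  for cx, cy in centers for vx, vy in circle_points)
--     hits = 0
--     prev = None
--     run = 0
--     for p in pts:
--         if prev is not None and p == prev:
--             run += 1
--             if run == 2:
--                 hits += 1
--         else:
--             prev = p
--             run = 1
--     return hits == n
-- ===== Notes on version B (the rewrite author's own statement) =====
-- stated objective: alternative
-- what changed: A tallies the nested sums into a hash dict with a three-way case analysis, an inline harmony counter and an early exit; B uses no dict at all: it flattens all sums into one list, sorts it, and counts runs of length >= 2 in a single linear scan over the sorted list, then compares that run count to n.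
import Mathlib
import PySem

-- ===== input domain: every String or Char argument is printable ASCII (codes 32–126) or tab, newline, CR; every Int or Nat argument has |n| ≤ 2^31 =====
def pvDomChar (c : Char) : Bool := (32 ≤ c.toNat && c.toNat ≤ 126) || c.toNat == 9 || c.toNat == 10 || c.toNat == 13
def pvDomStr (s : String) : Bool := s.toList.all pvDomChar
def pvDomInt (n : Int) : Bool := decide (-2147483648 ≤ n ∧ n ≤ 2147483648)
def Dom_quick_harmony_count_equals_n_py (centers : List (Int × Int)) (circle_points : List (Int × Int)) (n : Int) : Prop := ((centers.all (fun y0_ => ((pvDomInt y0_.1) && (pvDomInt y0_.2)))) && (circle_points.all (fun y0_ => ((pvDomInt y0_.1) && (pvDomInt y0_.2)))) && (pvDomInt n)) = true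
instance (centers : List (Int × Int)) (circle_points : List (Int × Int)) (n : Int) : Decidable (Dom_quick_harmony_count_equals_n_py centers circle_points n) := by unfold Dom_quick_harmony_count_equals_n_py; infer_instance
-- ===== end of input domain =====

-- B replaces A's dict-based tally (three-way case analysis, inline harmony counter, early exit)
-- by a dict-free sort-then-scan: flatten all sums into one sorted list and count runs of
-- length ≥ 2 in a single linear scan; an alternative algorithm of similar cost.

-- ===== PORT A =====
def pvOFF : Int := (1 : Int) <<< 15          -- _OFF = 1 << 15

def pvEncode (x y : Int) : Int :=            -- _encode (Python << and | via <<< / PySem.Int.bor, exact)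
  PySem.Int.bor ((x + pvOFF) <<< 17) (y + pvOFF)

-- one body of A's inner loop; `none` = the early `return False` was taken
def pvStepA (n : Int) (st : Option (PySem.Dict Int Int × Int)) (key : Int) :
    Option (PySem.Dict Int Int × Int) :=
  match st with
  | none => none
  | some (counts, harmony) =>
    match counts.get? key with
    | none => some (counts.insert key 1, harmony)
    | some cur =>
      if cur = 1 then
        let h' := harmony + 1
        if h' > n then none else some (counts.insert key 2, h')
      else
        some (counts.insert key (cur + 1), harmony)

def quick_harmony_count_equals_n_py (centers : List (Int × Int)) (circle_points : List (Int × Int)) (n : Int) : Bool :=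
  match centers.foldl
      (fun st c => circle_points.foldl
        (fun st v => pvStepA n st (pvEncode (c.1 + v.1) (c.2 + v.2))) st)
      (some (PySem.Dict.empty, (0 : Int))) with
  | none => false
  | some (_, harmony) => harmony == n

-- ===== PORT B =====
-- one body of B's scan loop; state = (prev, run, hits)
def pvStepB (st : Option Int × Int × Int) (p : Int) : Option Int × Int × Int :=
  match st with
  | (prev, run, hits) =>
    if prev = some p then
      (prev, run + 1, if run + 1 = 2 then hits + 1 else hits)
    else
      (some p, 1, hits)

def quick_harmony_count_equals_n_py_alt (centers : List (Int × Int)) (circle_points : List (Int × Int)) (n : Int) : Bool :=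
  let pts := PySem.List.sorted
    (centers.flatMap (fun c => circle_points.map (fun v => pvEncode (c.1 + v.1) (c.2 + v.2))))
    (fun x => x) false
  let st := pts.foldl pvStepB ((none : Option Int), (0 : Int), (0 : Int))
  st.2.2 == n

-- ===== PRECONDITION & SPEC =====
def Spec_quick_harmony_count_equals_n_py (centers : List (Int × Int)) (circle_points : List (Int × Int)) (n : Int) (out : Bool) : Prop := out = quick_harmony_count_equals_n_py_alt centers circle_points n
instance (centers : List (Int × Int)) (circle_points : List (Int × Int)) (n : Int) (out : Bool) : Decidable (Spec_quick_harmony_count_equals_n_py centers circle_points n out) := by unfold Spec_quick_harmony_count_equals_n_py; infer_instance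

-- ===== CLAIM (what is proved, stated in full; the proofs are below) =====
def Claim_equal_quick_harmony_count_equals_n_py : Prop := ∀ (centers : List (Int × Int)) (circle_points : List (Int × Int)) (n : Int), Dom_quick_harmony_count_equals_n_py centers circle_points n → Spec_quick_harmony_count_equals_n_py centers circle_points n (quick_harmony_count_equals_n_py centers circle_points n)

-- ===== LEMMAS AND PROOFS =====

-- proof-only helpers
@[reducible] def pvKeyOf (c v : Int × Int) : Int := pvEncode (c.1 + v.1) (c.2 + v.2)

def pvKeyList (centers circle_points : List (Int × Int)) : List Int :=
  centers.flatMap (fun c => circle_points.map (pvKeyOf c))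

-- number of distinct elements occurring at least twice
def pvHits (l : List Int) : Nat :=
  ((PySem.Set.ofList l).filter (fun k => decide (2 ≤ l.count k))).length

lemma pv_foldl_none (n : Int) (ks : List Int) : ks.foldl (pvStepA n) none = none := by
  induction ks with
  | nil => rfl
  | cons a t iht => simpa [pvStepA] using iht

def pvFinish (st : Option (PySem.Dict Int Int × Int)) (n : Int) : Bool :=
  match st with
  | none => false
  | some (_, harmony) => harmony == n

lemma pv_nested_foldl {β : Type} (f : β → Int → β)
    (centers circle_points : List (Int × Int)) (st : β) :
    centers.foldl (fun st c => circle_points.foldl (fun st v => f st (pvKeyOf c v)) st) st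
      = (pvKeyList centers circle_points).foldl f st := by
  induction centers generalizing st with
  | nil => simp [pvKeyList]
  | cons c cs ih =>
    simp only [List.foldl_cons, pvKeyList, List.flatMap_cons, List.foldl_append,
      List.foldl_map] at *
    rw [ih]

lemma pv_filter_length_change {α : Type} [DecidableEq α] (l : List α) (k : α)
    (q q' : α → Bool) (hqk : q k = false) (hq'k : q' k = true) :
    l.Nodup → k ∈ l → (∀ x ∈ l, x ≠ k → q x = q' x) →
    (l.filter q').length = (l.filter q).length + 1 := by
  induction l with
  | nil => intro _ hk _; cases hk
  | cons a t ih =>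
    intro hnd hk hsame
    by_cases hak : k = a
    · subst hak
      have hknt : k ∉ t := (List.nodup_cons.mp hnd).1
      have : t.filter q' = t.filter q := by
        apply List.filter_congr
        intro x hx
        exact (hsame x (List.mem_cons_of_mem _ hx) (fun h => hknt (h ▸ hx))).symm
      simp [hqk, hq'k, this]
    · have hkt : k ∈ t := by
        rcases List.mem_cons.mp hk with h | h
        · exact absurd h hak
        · exact h
      have hq : q a = q' a := hsame a (List.mem_cons_self) (fun h => hak (h.symm))
      have := ih (List.nodup_cons.mp hnd).2 hkt
        (fun x hx hxk => hsame x (List.mem_cons_of_mem _ hx) hxk)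
      by_cases h : q a = true
      · simp [h, ← hq, this]
      · simp at h
        simp [h, ← hq, this]

lemma pv_hits_append_singleton (p : List Int) (k : Int) :
    pvHits (p ++ [k]) = pvHits p + (if p.count k = 1 then 1 else 0) := by
  have hcount : ∀ x : Int, (p ++ [k]).count x = p.count x + (if x = k then 1 else 0) := by
    intro x
    by_cases hxk : x = k
    · simp [List.count_append, hxk]
    · simp [List.count_append, hxk, Ne.symm]
  by_cases hk : k ∈ p
  · have hset : PySem.Set.ofList (p ++ [k]) = PySem.Set.ofList p := by
      rw [PySem.Set.ofList_append_singleton]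
      simp [PySem.Set.add, PySem.Set.contains, PySem.Set.mem_ofList, hk]
    have hpos : 1 ≤ p.count k := List.one_le_count_iff.mpr hk
    by_cases hc : p.count k = 1
    · -- hits goes up by one, at the element k
      rw [pvHits, hset,
        pv_filter_length_change (PySem.Set.ofList p) k
          (fun x => decide (2 ≤ p.count x)) (fun x => decide (2 ≤ (p ++ [k]).count x))
          (by simp [hc]) (by simp [hcount k, hc])
          (PySem.Set.nodup_ofList p) ((PySem.Set.mem_ofList p k).mpr hk)
          (fun x _ hxk => by simp [hcount x, hxk])]
      simp [pvHits, hc]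
    · -- count k ≥ 2 already: nothing changes
      have h2 : 2 ≤ p.count k := by omega
      rw [pvHits, hset]
      have : (PySem.Set.ofList p).filter (fun x => decide (2 ≤ (p ++ [k]).count x))
           = (PySem.Set.ofList p).filter (fun x => decide (2 ≤ p.count x)) := by
        apply List.filter_congr
        intro x _
        by_cases hxk : x = k
        · subst hxk; simp [hcount x, h2]; omega
        · simp [hcount x, hxk]
      rw [this]
      simp [pvHits, hc]
  · have hc0 : p.count k = 0 := List.count_eq_zero.mpr hk
    have hset : PySem.Set.ofList (p ++ [k]) = PySem.Set.ofList p ++ [k] := by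
      rw [PySem.Set.ofList_append_singleton]
      simp [PySem.Set.add, PySem.Set.contains, PySem.Set.mem_ofList, hk]
    rw [pvHits, hset, List.filter_append]
    have h1 : [k].filter (fun x => decide (2 ≤ (p ++ [k]).count x)) = [] := by
      simp [hc0]
    have h2 : (PySem.Set.ofList p).filter (fun x => decide (2 ≤ (p ++ [k]).count x))
            = (PySem.Set.ofList p).filter (fun x => decide (2 ≤ p.count x)) := by
      apply List.filter_congr
      intro x hx
      have hxk : x ≠ k := fun h => hk (h ▸ (PySem.Set.mem_ofList p x).mp hx)
      simp [hcount x, hxk]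
    rw [h1, h2]
    simp [pvHits, hc0]

lemma pv_hits_le_append (p ks : List Int) : pvHits p ≤ pvHits (p ++ ks) := by
  induction ks generalizing p with
  | nil => simp
  | cons k ks ih =>
    have h1 : pvHits p ≤ pvHits (p ++ [k]) := by
      rw [pv_hits_append_singleton]; omega
    have h2 := ih (p ++ [k])
    rw [List.append_assoc] at h2
    simpa using le_trans h1 h2

lemma pv_insert_eq_counter (p : List Int) (k : Int) (v : Int)
    (hv : v = (PySem.Dict.counter p).getD k 0 + 1) :
    (PySem.Dict.counter p).insert k v = PySem.Dict.counter (p ++ [k]) := by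
  subst hv
  rw [PySem.Dict.counter_append_singleton]
  rfl

lemma pv_runA (ks : List Int) : ∀ (p : List Int) (n : Int),
    pvFinish (ks.foldl (pvStepA n) (some (PySem.Dict.counter p, (pvHits p : Int)))) n
      = (((pvHits (p ++ ks) : Nat) : Int) == n) := by
  induction ks with
  | nil => intro p n; simp [pvFinish]
  | cons k ks ih =>
    intro p n
    have hgetD : (PySem.Dict.counter p).getD k 0 = (p.count k : Int) :=
      PySem.Dict.getD_counter p k
    rw [List.foldl_cons]
    rcases hg : (PySem.Dict.counter p).get? k with _ | cur
    · -- key absent: count = 0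
      have hnc : (PySem.Dict.counter p).contains k = false := by
        rw [PySem.Dict.contains_eq_isSome_get?, hg]; rfl
      have hk : k ∉ p := by
        rw [PySem.Dict.contains_counter] at hnc
        simpa using hnc
      have hc0 : p.count k = 0 := List.count_eq_zero.mpr hk
      have hd : (PySem.Dict.counter p).insert k 1 = PySem.Dict.counter (p ++ [k]) := by
        apply pv_insert_eq_counter
        rw [hgetD, hc0]; simp
      have hh : pvHits (p ++ [k]) = pvHits p := by
        rw [pv_hits_append_singleton]; simp [hc0]
      simp only [pvStepA, hg, hd, ← hh]
      rw [ih (p ++ [k]) n, List.append_assoc]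
      rfl
    · -- key present
      have hcur : cur = (p.count k : Int) := by
        have := PySem.Dict.getD_of_get?_eq_some (d := PySem.Dict.counter p) (d0 := 0) hg
        rw [hgetD] at this; omega
      have hmem : k ∈ p := by
        have : (PySem.Dict.counter p).contains k = true := by
          rw [PySem.Dict.contains_eq_isSome_get?, hg]; rfl
        rw [PySem.Dict.contains_counter] at this
        simpa using this
      have hpos : 1 ≤ p.count k := List.one_le_count_iff.mpr hmem
      by_cases h1 : cur = 1
      · have hc1 : p.count k = 1 := by omega
        have hh : pvHits (p ++ [k]) = pvHits p + 1 := by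
          rw [pv_hits_append_singleton]; simp [hc1]
        by_cases hex : (pvHits p : Int) + 1 > n
        · -- early exit: the final hit count still exceeds n
          have hmono : pvHits (p ++ [k]) ≤ pvHits (p ++ k :: ks) := by
            have := pv_hits_le_append (p ++ [k]) ks
            rwa [List.append_assoc] at this
          have hne : ((pvHits (p ++ k :: ks) : Nat) : Int) ≠ n := by
            rw [hh] at hmono
            omega
          simp only [pvStepA, hg, if_pos h1, if_pos hex, pv_foldl_none]
          simp [pvFinish, hne]
        · have hd : (PySem.Dict.counter p).insert k 2 = PySem.Dict.counter (p ++ [k]) := by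
            apply pv_insert_eq_counter
            rw [hgetD, hc1]; simp
          simp only [pvStepA, hg, if_pos h1, if_neg hex, hd]
          have : (pvHits p : Int) + 1 = ((pvHits (p ++ [k]) : Nat) : Int) := by
            rw [hh]; push_cast; ring
          rw [this, ih (p ++ [k]) n, List.append_assoc]
          rfl
      · have hc2 : p.count k ≠ 1 := by omega
        have hh : pvHits (p ++ [k]) = pvHits p := by
          rw [pv_hits_append_singleton]; simp [hc2]
        have hd : (PySem.Dict.counter p).insert k (cur + 1) = PySem.Dict.counter (p ++ [k]) := by
          apply pv_insert_eq_counter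
          rw [hgetD, hcur]
        simp only [pvStepA, hg, if_neg h1, hd, ← hh]
        rw [ih (p ++ [k]) n, List.append_assoc]
        rfl

lemma pv_A_eq (centers circle_points : List (Int × Int)) (n : Int) :
    quick_harmony_count_equals_n_py centers circle_points n
      = (((pvHits (pvKeyList centers circle_points) : Nat) : Int) == n) := by
  have h := pv_nested_foldl (pvStepA n) centers circle_points
    (some (PySem.Dict.empty, (0 : Int)))
  have e : (some ((PySem.Dict.empty : PySem.Dict Int Int), (0 : Int)))
      = some (PySem.Dict.counter [], ((pvHits [] : Nat) : Int)) := rfl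
  have hrun := pv_runA (pvKeyList centers circle_points) [] n
  rw [List.nil_append] at hrun
  unfold quick_harmony_count_equals_n_py
  rw [show (fun st c => circle_points.foldl
        (fun st v => pvStepA n st (pvEncode (c.1 + v.1) (c.2 + v.2))) st)
      = (fun st c => circle_points.foldl (fun st v => pvStepA n st (pvKeyOf c v)) st) from rfl,
    h, e]
  exact hrun

-- ===== B-side lemmas: the scan over a sorted list counts distinct elements of count ≥ 2 =====

lemma pv_hits_perm (l l' : List Int) (h : l.Perm l') : pvHits l = pvHits l' := by
  have hset : (PySem.Set.ofList l).Perm (PySem.Set.ofList l') := by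
    rw [List.perm_ext_iff_of_nodup (PySem.Set.nodup_ofList l) (PySem.Set.nodup_ofList l')]
    intro a
    rw [PySem.Set.mem_ofList, PySem.Set.mem_ofList]
    exact h.mem_iff
  have hpred : (fun k : Int => decide (2 ≤ l.count k))
      = (fun k : Int => decide (2 ≤ l'.count k)) := by
    funext k
    rw [h.count_eq]
  rw [pvHits, pvHits, hpred, (hset.filter _).length_eq]

-- in a nondecreasing list every element is ≤ the last one
lemma pv_le_getLast (p : List Int) (x a : Int) (hp : p.Pairwise (· ≤ ·))
    (hx : p.getLast? = some x) (ha : a ∈ p) : a ≤ x := by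
  induction p with
  | nil => cases ha
  | cons h t ih =>
    cases t with
    | nil =>
      simp only [List.getLast?_singleton, Option.some.injEq] at hx
      simp only [List.mem_singleton] at ha
      omega
    | cons b u =>
      have hx' : (b :: u).getLast? = some x := by
        rwa [List.getLast?_cons_cons] at hx
      have hxin : x ∈ b :: u := List.mem_of_getLast? hx'
      rcases List.mem_cons.mp ha with rfl | hat
      · exact (List.pairwise_cons.mp hp).1 x hxin
      · exact ih (List.pairwise_cons.mp hp).2 hx' hat

lemma pv_runB (ks : List Int) : ∀ (p : List Int) (x : Int),
    p.getLast? = some x → (p ++ ks).Pairwise (· ≤ ·) →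
    (ks.foldl pvStepB (some x, ((p.count x : Nat) : Int), ((pvHits p : Nat) : Int))).2.2
      = ((pvHits (p ++ ks) : Nat) : Int) := by
  induction ks with
  | nil => intro p x _ _; simp
  | cons k t ih =>
    intro p x hx hp
    have hsplit := List.pairwise_append.mp hp
    have hpp : p.Pairwise (· ≤ ·) := hsplit.1
    have hple : ∀ a ∈ p, a ≤ k := fun a ha => hsplit.2.2 a ha k (List.mem_cons_self)
    have hxmem : x ∈ p := List.mem_of_getLast? hx
    have hp' : ((p ++ [k]) ++ t).Pairwise (· ≤ ·) := by
      rw [List.append_assoc]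
      simpa using hp
    rw [List.foldl_cons]
    by_cases hkx : x = k
    · -- run continues
      subst hkx
      have hstep : pvStepB (some x, ((p.count x : Nat) : Int), ((pvHits p : Nat) : Int)) x
          = (some x, ((p.count x : Nat) : Int) + 1,
             if ((p.count x : Nat) : Int) + 1 = 2 then ((pvHits p : Nat) : Int) + 1
             else ((pvHits p : Nat) : Int)) := by
        simp [pvStepB]
      rw [hstep]
      have hcnt : (((p ++ [x]).count x : Nat) : Int) = ((p.count x : Nat) : Int) + 1 := by
        simp [List.count_append]
      have hhits : (if ((p.count x : Nat) : Int) + 1 = 2 then ((pvHits p : Nat) : Int) + 1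
            else ((pvHits p : Nat) : Int)) = ((pvHits (p ++ [x]) : Nat) : Int) := by
        rw [pv_hits_append_singleton]
        by_cases hc : p.count x = 1
        · simp [hc]
        · have : ¬ (((p.count x : Nat) : Int) + 1 = 2) := by omega
          simp [hc, this]
      rw [show (some x, ((p.count x : Nat) : Int) + 1,
            if ((p.count x : Nat) : Int) + 1 = 2 then ((pvHits p : Nat) : Int) + 1
            else ((pvHits p : Nat) : Int))
          = (some x, (((p ++ [x]).count x : Nat) : Int), ((pvHits (p ++ [x]) : Nat) : Int)) by
        rw [hcnt, hhits]]
      rw [ih (p ++ [x]) x List.getLast?_concat hp', List.append_assoc]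
      rfl
    · -- new run starts
      have hkp : k ∉ p := by
        intro hkin
        have h1 : k ≤ x := pv_le_getLast p x k hpp hx hkin
        have h2 : x ≤ k := hple x hxmem
        exact hkx (by omega)
      have hc0 : p.count k = 0 := List.count_eq_zero.mpr hkp
      have hstep : pvStepB (some x, ((p.count x : Nat) : Int), ((pvHits p : Nat) : Int)) k
          = (some k, 1, ((pvHits p : Nat) : Int)) := by
        have : ¬ ((some x : Option Int) = some k) := by simpa using hkx
        simp [pvStepB, this]
      rw [hstep]
      have hcnt : (((p ++ [k]).count k : Nat) : Int) = 1 := by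
        simp [List.count_append, hc0]
      have hhits : pvHits (p ++ [k]) = pvHits p := by
        rw [pv_hits_append_singleton]; simp [hc0]
      rw [show ((some k : Option Int), (1 : Int), ((pvHits p : Nat) : Int))
          = (some k, (((p ++ [k]).count k : Nat) : Int), ((pvHits (p ++ [k]) : Nat) : Int)) by
        rw [hcnt, hhits]]
      rw [ih (p ++ [k]) k List.getLast?_concat hp', List.append_assoc]
      rfl

lemma pv_scan_eq (l : List Int) (h : l.Pairwise (· ≤ ·)) :
    (l.foldl pvStepB ((none : Option Int), (0 : Int), (0 : Int))).2.2
      = ((pvHits l : Nat) : Int) := by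
  cases l with
  | nil => rfl
  | cons k t =>
    rw [List.foldl_cons]
    have h0 : pvStepB ((none : Option Int), (0 : Int), (0 : Int)) k = (some k, 1, 0) := by
      simp [pvStepB]
    have hk1 : (([k].count k : Nat) : Int) = 1 := by simp
    have hk0 : ((pvHits [k] : Nat) : Int) = 0 := by
      have := pv_hits_append_singleton [] k
      simp only [List.nil_append] at this
      rw [this]
      rfl
    rw [h0, show ((some k : Option Int), (1 : Int), (0 : Int))
        = (some k, (([k].count k : Nat) : Int), ((pvHits [k] : Nat) : Int)) by rw [hk1, hk0]]
    have hget : ([k] : List Int).getLast? = some k := rfl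
    have hpair : (([k] : List Int) ++ t).Pairwise (· ≤ ·) := by simpa using h
    rw [pv_runB t [k] k hget hpair]
    rfl

lemma pv_B_eq (centers circle_points : List (Int × Int)) (n : Int) :
    quick_harmony_count_equals_n_py_alt centers circle_points n
      = (((pvHits (pvKeyList centers circle_points) : Nat) : Int) == n) := by
  unfold quick_harmony_count_equals_n_py_alt
  have hkeys : centers.flatMap
        (fun c => circle_points.map (fun v => pvEncode (c.1 + v.1) (c.2 + v.2)))
      = pvKeyList centers circle_points := rfl
  rw [hkeys]
  set pts := PySem.List.sorted (pvKeyList centers circle_points) (fun x => x) false with hpts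
  have hpair : pts.Pairwise (· ≤ ·) := by
    have := PySem.List.sorted_pairwise (pvKeyList centers circle_points) (fun x : Int => x)
    simpa [hpts] using this
  have hperm : pts.Perm (pvKeyList centers circle_points) :=
    PySem.List.sorted_perm _ _ _
  show ((pts.foldl pvStepB ((none : Option Int), (0 : Int), (0 : Int))).2.2 == n)
      = (((pvHits (pvKeyList centers circle_points) : Nat) : Int) == n)
  rw [pv_scan_eq pts hpair, pv_hits_perm pts _ hperm]

-- ===== VERDICT (by name: the statement is the Claim_ definition above) =====
theorem quick_harmony_count_equals_n_py_spec : Claim_equal_quick_harmony_count_equals_n_py := by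
  intro centers circle_points n _
  unfold Spec_quick_harmony_count_equals_n_py
  rw [pv_A_eq, pv_B_eq]
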